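-- pv_equiv track=rewrite | github.com/Epic-Concept/finance-manager | apps/api/src/finance_api/services/high_frequency_analyzer.py | _remove_overlapping_patterns
-- ===== SOURCE A (Python) =====
-- def _remove_overlapping_patterns(
--
--     patterns: list[tuple[str, int]],
-- ) -> list[tuple[str, int]]:
--     """Remove shorter patterns that are substrings of longer ones.
--
--     When both "ZAKUP PRZY" and "ZAKUP PRZY UZYCIU KARTY" meet the threshold,
--     keep only the longer pattern.
--
--     Args:
--         patterns: List of (phrase, count) tuples, sorted by count descending.
--
--     Returns:
--         Filtered list with overlapping shorter patterns removed.
--     """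
--     if not patterns:
--         return []
--
--     # Sort by phrase length descending (longest first)
--     sorted_by_length = sorted(patterns, key=lambda x: len(x[0]), reverse=True)
--
--     kept_patterns: list[tuple[str, int]] = []
--     for phrase, count in sorted_by_length:
--         # Check if this phrase is a substring of any already-kept pattern
--         is_substring = any(phrase in kept[0] for kept in kept_patterns)
--         if not is_substring:
--             kept_patterns.append((phrase, count))
--
--     # Return in original order (by count)
--     kept_set = {p[0] for p in kept_patterns}
--     return [(p, c) for p, c in patterns if p in kept_set]
-- ===== SOURCE B (Python) =====
-- def _remove_overlapping_patterns(
--     patterns: list[tuple[str, int]],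
-- ) -> list[tuple[str, int]]:
--     strings = {p for p, _ in patterns}
--     kept = {s for s in strings if not any(s != t and s in t for t in strings)}
--     return [(p, c) for p, c in patterns if p in kept]
-- ===== Notes on version B (the rewrite author's own statement) =====
-- stated objective: simpler
-- what changed: Replaced A's sort-by-length-descending plus incremental kept-list greedy with a direct all-pairs test: a phrase survives iff no other distinct phrase string contains it (transitivity of substring makes the greedy equivalent), then the original list is filtered once.
import Mathlib
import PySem

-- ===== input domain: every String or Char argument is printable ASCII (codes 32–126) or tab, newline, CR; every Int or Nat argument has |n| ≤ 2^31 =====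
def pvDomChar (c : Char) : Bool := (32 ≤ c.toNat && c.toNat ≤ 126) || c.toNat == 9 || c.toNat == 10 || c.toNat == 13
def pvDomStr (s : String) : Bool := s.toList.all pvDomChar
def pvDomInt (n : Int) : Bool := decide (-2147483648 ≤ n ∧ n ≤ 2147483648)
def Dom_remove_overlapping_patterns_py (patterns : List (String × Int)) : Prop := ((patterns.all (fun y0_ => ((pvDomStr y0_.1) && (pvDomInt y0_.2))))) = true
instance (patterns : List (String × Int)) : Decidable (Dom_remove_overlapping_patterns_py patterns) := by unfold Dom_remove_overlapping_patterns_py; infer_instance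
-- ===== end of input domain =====

-- B replaces A's sort-longest-first + incremental kept-list with a direct "no other distinct phrase contains it"
-- all-pairs test over the set of phrases (simpler decomposition, same results).

-- ===== PORT A =====
-- loop body of A's for-loop over the length-sorted list
def pvStepA (kept : List (String × Int)) (pc : String × Int) : List (String × Int) :=
  if kept.any (fun k => PySem.Str.isIn pc.1 k.1) then kept else kept ++ [pc]

def remove_overlapping_patterns_py (patterns : List (String × Int)) : List (String × Int) :=
  if patterns = [] then []
  else
    let sorted_by_length := PySem.List.sorted patterns (fun x => PySem.Str.len x.1) true
    let kept_patterns := sorted_by_length.foldl pvStepA []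
    let kept_set := PySem.Set.ofList (kept_patterns.map (fun p => p.1))
    patterns.filter (fun pc => PySem.Set.contains kept_set pc.1)

-- ===== PORT B =====
def remove_overlapping_patterns_py_alt (patterns : List (String × Int)) : List (String × Int) :=
  let strings := PySem.Set.ofList (patterns.map (fun p => p.1))
  let kept := strings.filter (fun s => ! strings.any (fun t => s != t && PySem.Str.isIn s t))
  patterns.filter (fun pc => PySem.Set.contains kept pc.1)

-- ===== PRECONDITION & SPEC =====
def Spec_remove_overlapping_patterns_py (patterns : List (String × Int)) (out : List (String × Int)) : Prop := out = remove_overlapping_patterns_py_alt patterns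
instance (patterns : List (String × Int)) (out : List (String × Int)) : Decidable (Spec_remove_overlapping_patterns_py patterns out) := by unfold Spec_remove_overlapping_patterns_py; infer_instance

-- ===== CLAIM (what is proved, stated in full; the proofs are below) =====
def Claim_equal_remove_overlapping_patterns_py : Prop := ∀ (patterns : List (String × Int)), Dom_remove_overlapping_patterns_py patterns → Spec_remove_overlapping_patterns_py patterns (remove_overlapping_patterns_py patterns)

-- ===== LEMMAS AND PROOFS =====

-- s is "maximal" among the phrases L: no other distinct phrase contains it
def pvMaximal (L : List String) (s : String) : Prop :=
  ∀ t ∈ L, s = t ∨ ¬ s.toList <:+: t.toList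

-- a nonempty list has an element of maximal string length (List.exists_max_image is absent from this Mathlib)
theorem pv_exists_max_len : ∀ (l : List String), l ≠ [] →
    ∃ a ∈ l, ∀ b ∈ l, b.toList.length ≤ a.toList.length := by
  intro l
  induction l with
  | nil => intro h; exact absurd rfl h
  | cons x xs ih =>
    intro _
    by_cases hxs : xs = []
    · subst hxs
      exact ⟨x, List.mem_cons_self, by intro b hb; simp at hb; simp [hb]⟩
    · obtain ⟨a, ha, hmax⟩ := ih hxs
      by_cases hle : x.toList.length ≤ a.toList.length
      · exact ⟨a, List.mem_cons_of_mem _ ha, by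
          intro b hb
          rcases List.mem_cons.mp hb with h | h
          · subst h; exact hle
          · exact hmax b h⟩
      · exact ⟨x, List.mem_cons_self, by
          intro b hb
          rcases List.mem_cons.mp hb with h | h
          · subst h; exact le_refl _
          · exact le_trans (hmax b h) (by omega)⟩

-- a non-maximal phrase has a strictly longer MAXIMAL container among the phrases
theorem pv_exists_maximal_container (L : List String) (s : String) (h : ¬ pvMaximal L s) :
    ∃ u ∈ L, s ≠ u ∧ s.toList <:+: u.toList ∧ pvMaximal L u ∧ s.toList.length < u.toList.length := by
  classical
  unfold pvMaximal at h
  push Not at h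
  obtain ⟨t0, ht0L, ht0ne, ht0inf⟩ := h
  -- the containers of s in L
  set C := L.filter (fun t => decide (s ≠ t) && decide (s.toList <:+: t.toList)) with hC
  have hCne : C ≠ [] := by
    intro hnil
    have : t0 ∈ C := by
      rw [hC]; apply List.mem_filter.mpr
      exact ⟨ht0L, by simp [ht0ne, ht0inf]⟩
    rw [hnil] at this; exact absurd this (List.not_mem_nil)
  obtain ⟨u, huC, humax⟩ := pv_exists_max_len C hCne
  have huprop := List.mem_filter.mp huC
  have huL : u ∈ L := huprop.1
  have hu2 : s ≠ u ∧ s.toList <:+: u.toList := by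
    have := huprop.2; simp at this; exact this
  have hlen : s.toList.length < u.toList.length := by
    have hle := List.IsInfix.length_le hu2.2
    rcases lt_or_eq_of_le hle with h | h
    · exact h
    · exact absurd (String.toList_inj.mp (List.IsInfix.eq_of_length hu2.2 h)) hu2.1
  refine ⟨u, huL, hu2.1, hu2.2, ?_, hlen⟩
  -- u is maximal: any strict container of u would be a longer container of s
  intro v hvL
  by_contra hcon
  push Not at hcon
  obtain ⟨hne, hinf⟩ := hcon
  have hsv : s.toList <:+: v.toList := List.IsInfix.trans hu2.2 hinf
  have hlenuv : u.toList.length < v.toList.length := by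
    have hle := List.IsInfix.length_le hinf
    rcases lt_or_eq_of_le hle with h | h
    · exact h
    · exact absurd (String.toList_inj.mp (List.IsInfix.eq_of_length hinf h)) hne
  have hsnev : s ≠ v := by
    intro he; subst he
    exact absurd (lt_trans hlen hlenuv) (by simp)
  have hvC : v ∈ C := by
    rw [hC]; apply List.mem_filter.mpr
    exact ⟨hvL, by simp [hsnev, hsv]⟩
  exact absurd (humax v hvC) (by omega)

-- the invariant of A's fold: at the end, the kept phrases are exactly the maximal phrases of L
theorem pv_fold_inv (L : List String) :
    ∀ (suf K : List (String × Int)),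
    (∀ pc ∈ suf, pc.1 ∈ L) →
    suf.Pairwise (fun a b => b.1.toList.length ≤ a.1.toList.length) →
    (∀ s ∈ K.map Prod.fst, s ∈ L ∧ pvMaximal L s) →
    (∀ u ∈ L, pvMaximal L u → u ∈ K.map Prod.fst ∨ ∃ c, (u, c) ∈ suf) →
    ∀ s, s ∈ (suf.foldl pvStepA K).map Prod.fst ↔ s ∈ L ∧ pvMaximal L s := by
  intro suf
  induction suf with
  | nil =>
    intro K _ _ h1 h2 s
    constructor
    · exact h1 s
    · intro ⟨hsL, hsmax⟩
      rcases h2 s hsL hsmax with h | ⟨c, hc⟩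
      · exact h
      · exact absurd hc (List.not_mem_nil)
  | cons pc suf ih =>
    intro K hsubL hsort h1 h2 s
    rw [List.foldl_cons]
    have hsort' := (List.pairwise_cons.mp hsort).2
    have hhead := (List.pairwise_cons.mp hsort).1
    have hsubL' : ∀ q ∈ suf, q.1 ∈ L := fun q hq => hsubL q (List.mem_cons_of_mem _ hq)
    have hpcL : pc.1 ∈ L := hsubL pc List.mem_cons_self
    -- if pc.1 is not maximal, it has a maximal container already in K
    have hdropped : ¬ pvMaximal L pc.1 → ∃ k ∈ K, pc.1.toList <:+: k.1.toList := by
      intro hnm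
      obtain ⟨u, huL, hune, huinf, humax, hulen⟩ := pv_exists_maximal_container L pc.1 hnm
      rcases h2 u huL humax with hK | ⟨c, hc⟩
      · obtain ⟨k, hkK, hk1⟩ := List.mem_map.mp hK
        exact ⟨k, hkK, hk1 ▸ huinf⟩
      · rcases List.mem_cons.mp hc with h | h
        · exact absurd (congrArg Prod.fst h).symm hune
        · have hle : u.toList.length ≤ pc.1.toList.length := hhead (u, c) h
          exact absurd hulen (by omega)
    unfold pvStepA
    by_cases hany : K.any (fun k => PySem.Str.isIn pc.1 k.1) = true
    · -- pc is dropped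
      simp only [hany, if_true]
      -- pc.1 is already kept if it is maximal
      have hinK : pvMaximal L pc.1 → pc.1 ∈ K.map Prod.fst := by
        intro hmax
        obtain ⟨k, hkK, hkin⟩ := List.any_eq_true.mp hany
        have hinf : pc.1.toList <:+: k.1.toList := (PySem.Str.isIn_iff_infix _ _).mp hkin
        have hkL : k.1 ∈ L := (h1 k.1 (List.mem_map.mpr ⟨k, hkK, rfl⟩)).1
        rcases hmax k.1 hkL with h | h
        · exact h ▸ List.mem_map.mpr ⟨k, hkK, rfl⟩
        · exact absurd hinf h
      apply ih K hsubL' hsort' h1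
      intro u huL humax
      rcases h2 u huL humax with h | ⟨c, hc⟩
      · exact Or.inl h
      · rcases List.mem_cons.mp hc with h | h
        · have : u = pc.1 := congrArg Prod.fst h
          exact Or.inl (this ▸ hinK (this ▸ humax))
        · exact Or.inr ⟨c, h⟩
    · -- pc is appended: it must be maximal
      simp only [hany]
      have hmax : pvMaximal L pc.1 := by
        by_contra hnm
        obtain ⟨k, hkK, hinf⟩ := hdropped hnm
        exact hany (List.any_eq_true.mpr ⟨k, hkK, (PySem.Str.isIn_iff_infix _ _).mpr hinf⟩)
      apply ih (K ++ [pc]) hsubL' hsort'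
      · intro t ht
        rw [List.map_append, List.mem_append] at ht
        rcases ht with h | h
        · exact h1 t h
        · simp at h; exact h ▸ ⟨hpcL, hmax⟩
      · intro u huL humax
        rcases h2 u huL humax with h | ⟨c, hc⟩
        · exact Or.inl (by rw [List.map_append, List.mem_append]; exact Or.inl h)
        · rcases List.mem_cons.mp hc with h | h
          · have hu : u = pc.1 := congrArg Prod.fst h
            exact Or.inl (by rw [List.map_append, List.mem_append]; right; simp [hu])
          · exact Or.inr ⟨c, h⟩

-- the kept set of A's port contains exactly the maximal phrases
theorem pv_keptA_iff (patterns : List (String × Int)) (s : String) :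
    s ∈ ((PySem.List.sorted patterns (fun x => PySem.Str.len x.1) true).foldl pvStepA []).map Prod.fst
      ↔ s ∈ patterns.map Prod.fst ∧ pvMaximal (patterns.map Prod.fst) s := by
  set L := patterns.map Prod.fst with hL
  set SL := PySem.List.sorted patterns (fun x => PySem.Str.len x.1) true with hSL
  have hperm : SL.Perm patterns := PySem.List.sorted_perm patterns _ true
  apply pv_fold_inv L SL []
  · intro pc hpc
    exact hL ▸ List.mem_map.mpr ⟨pc, hperm.mem_iff.mp hpc, rfl⟩
  · have := PySem.List.sorted_pairwise_rev patterns (fun x => PySem.Str.len x.1)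
    rw [← hSL] at this
    apply List.Pairwise.imp _ this
    intro a b h
    simpa [PySem.Str.len_eq] using h
  · intro t ht; exact absurd ht (List.not_mem_nil)
  · intro u huL _
    obtain ⟨pc, hpc, h1⟩ := List.mem_map.mp (hL ▸ huL)
    exact Or.inr ⟨pc.2, by rw [hperm.mem_iff]; rwa [← h1, Prod.mk.eta]⟩

-- the kept set of B's port contains exactly the maximal phrases
theorem pv_keptB_iff (patterns : List (String × Int)) (s : String) :
    s ∈ (PySem.Set.ofList (patterns.map (fun p => p.1))).filter
          (fun s => ! (PySem.Set.ofList (patterns.map (fun p => p.1))).any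
              (fun t => s != t && PySem.Str.isIn s t))
      ↔ s ∈ patterns.map Prod.fst ∧ pvMaximal (patterns.map Prod.fst) s := by
  rw [List.mem_filter]
  have hpred : ∀ (s : String),
      ((! (PySem.Set.ofList (patterns.map (fun p => p.1))).any
          (fun t => s != t && PySem.Str.isIn s t)) = true)
      ↔ pvMaximal (patterns.map Prod.fst) s := by
    intro s
    unfold pvMaximal
    rw [Bool.not_eq_true', List.any_eq_false]
    constructor
    · intro h t htL
      have := h t ((PySem.Set.mem_ofList _ _).mpr htL)
      by_cases he : s = t
      · exact Or.inl he
      · refine Or.inr ?_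
        intro hinf
        rw [show (s != t) = true from bne_iff_ne.mpr he,
           (PySem.Str.isIn_iff_infix s t).mpr hinf] at this
        simp at this
    · intro h t htS
      have htL := (PySem.Set.mem_ofList _ _).mp htS
      rcases h t htL with he | hni
      · simp [he]
      · cases hq : PySem.Str.isIn s t
        · simp
        · exact absurd ((PySem.Str.isIn_iff_infix s t).mp hq) hni
  rw [hpred, PySem.Set.mem_ofList]

-- ===== VERDICT (by name: the statement is the Claim_ definition above) =====
theorem remove_overlapping_patterns_py_spec : Claim_equal_remove_overlapping_patterns_py := by
  intro patterns _
  unfold Spec_remove_overlapping_patterns_py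
  unfold remove_overlapping_patterns_py remove_overlapping_patterns_py_alt
  by_cases hnil : patterns = []
  · simp [hnil]
  · simp only [hnil, if_false]
    apply (List.filter_congr _).symm
    intro pc _
    have hA := pv_keptA_iff patterns pc.1
    have hB := pv_keptB_iff patterns pc.1
    rw [Bool.eq_iff_iff]
    rw [PySem.Set.contains_iff, PySem.Set.contains_iff]
    rw [PySem.Set.mem_ofList, hB, ← hA]
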